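-- pv_equiv track=rewrite | github.com/SaniyaM/QOSF-Assessment-Task | functions_qosf.py | solution_states
-- ===== SOURCE A (Python) =====
-- def solution_states(n):
-- 	state_1=0
-- 	state_2=0
-- 	for i in range(0,n-1,2):
-- 		state_1= state_1 + 2**(i+n%2)
-- 	state_2 = 2**n - 1 - state_1
-- 	solution_states = [state_1, state_2]
-- 	return solution_states
-- ===== SOURCE B (Python) =====
-- def solution_states(n):
--     p = 1 << n
--     s1 = (p - 1 - n % 2) // 3
--     return [s1, p - 1 - s1]
-- ===== Notes on version B (the rewrite author's own statement) =====
-- stated objective: faster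
-- what changed: Replaces the O(n) loop of big-integer additions of powers of two by the closed-form geometric-series value s1 = (2^n - 1 - n%2)//3 computed with one shift.
-- outside the precondition, e.g. on solution_states(-1): A returns [0, -0.5], B raises ValueError
import Mathlib
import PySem

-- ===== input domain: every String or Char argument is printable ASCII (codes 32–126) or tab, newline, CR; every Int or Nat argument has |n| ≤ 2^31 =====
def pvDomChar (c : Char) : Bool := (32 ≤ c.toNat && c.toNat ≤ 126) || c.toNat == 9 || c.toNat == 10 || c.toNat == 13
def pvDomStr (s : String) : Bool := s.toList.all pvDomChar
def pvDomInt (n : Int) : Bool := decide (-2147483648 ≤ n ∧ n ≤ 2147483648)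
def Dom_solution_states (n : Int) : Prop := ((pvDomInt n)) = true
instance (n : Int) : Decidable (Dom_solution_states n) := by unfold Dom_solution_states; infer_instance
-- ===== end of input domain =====

-- B replaces A's O(n) loop of power-of-two additions by the closed-form geometric series (2^n - 1 - n%2)//3 (faster).


-- ===== PORT A =====
-- 2**e is ported as 2 ^ e.toNat: exact for nonnegative exponents, which Pre_ (0 ≤ n) guarantees.
def solution_states (n : Int) : List Int :=
  let state_1 := (PySem.List.pyRange 0 (n - 1) 2).foldl
      (fun s i => s + 2 ^ (i + PySem.Int.mod n 2).toNat) 0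
  let state_2 := 2 ^ n.toNat - 1 - state_1
  [state_1, state_2]

-- ===== PORT B =====
-- 1 << n is ported as 2 ^ n.toNat: exact for 0 ≤ n (Pre_); for n < 0 Python raises ValueError.
def solution_states_alt (n : Int) : List Int :=
  let p : Int := 2 ^ n.toNat
  let s1 := PySem.Int.floordiv (p - 1 - PySem.Int.mod n 2) 3
  [s1, p - 1 - s1]

-- ===== PRECONDITION & SPEC =====
-- Pre_ excludes n < 0, where A returns a float (2**n is fractional), outside the declared List Int type; B raises ValueError there.
def Pre_solution_states (n : Int) : Prop := 0 ≤ n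
instance (n : Int) : Decidable (Pre_solution_states n) := by unfold Pre_solution_states; infer_instance
def pvWitness_solution_states : Int := 5
def Spec_solution_states (n : Int) (out : List Int) : Prop := out = solution_states_alt n
instance (n : Int) (out : List Int) : Decidable (Spec_solution_states n out) := by unfold Spec_solution_states; infer_instance

-- ===== CLAIM (what is proved, stated in full; the proofs are below) =====
def Claim_equal_solution_states : Prop := ∀ (n : Int), Dom_solution_states n → Pre_solution_states n → Spec_solution_states n (solution_states n)

-- ===== LEMMAS AND PROOFS =====

-- geometric series: 3 * Σ_{k<m} 2^(2k+r) = 2^(2m+r) - 2^r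
lemma pv_geom (rn : Nat) : ∀ m : Nat,
    3 * (List.range m).foldl (fun s k => s + (2:Int) ^ (2 * k + rn)) 0
      = 2 ^ (2 * m + rn) - 2 ^ rn := by
  intro m
  induction m with
  | zero => simp
  | succ m ih =>
    rw [List.range_succ, List.foldl_append]
    simp only [List.foldl_cons, List.foldl_nil]
    have : (2:Int) ^ (2 * (m + 1) + rn) = 4 * 2 ^ (2 * m + rn) := by
      rw [show 2 * (m + 1) + rn = (2 * m + rn) + 2 by omega]
      ring
    rw [mul_add, ih, this]
    ring

lemma pv_mod_two (N : Nat) : PySem.Int.mod (N : Int) 2 = ((N % 2 : Nat) : Int) := by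
  simp [PySem.Int.mod, Int.fmod_eq_emod]

theorem solution_states_spec : Claim_equal_solution_states := by
  intro n _ hpre
  unfold Spec_solution_states solution_states solution_states_alt
  obtain ⟨N, rfl⟩ : ∃ N : Nat, n = (N : Int) := ⟨n.toNat, (Int.toNat_of_nonneg hpre).symm⟩
  rw [pv_mod_two]
  rw [PySem.List.pyRange_of_pos 0 ((N:Int) - 1) (by norm_num)]
  rw [List.foldl_map]
  have hexp : ∀ k : Nat, ((0 + 2 * (k:Int) + ((N % 2 : Nat) : Int)).toNat) = 2 * k + N % 2 := by
    intro k; omega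
  simp only [hexp]
  have hlen : (if (0:Int) < (N:Int) - 1 then (((N:Int) - 1 - 0 + 2 - 1) / 2).toNat else 0) = N / 2 := by
    split_ifs with h
    · omega
    · omega
  rw [hlen]
  have hS := pv_geom (N % 2) (N / 2)
  set S := (List.range (N / 2)).foldl (fun s k => s + (2:Int) ^ (2 * k + N % 2)) 0 with hSdef
  have hn : 2 * (N / 2) + N % 2 = N := by omega
  rw [hn] at hS
  have hcast : ((N:Int)).toNat = N := by omega
  rw [hcast]
  have h2r : ((2:Int)) ^ (N % 2) = 1 + ((N % 2 : Nat) : Int) := by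
    rcases Nat.mod_two_eq_zero_or_one N with h | h <;> rw [h] <;> norm_num
  have hval : (2:Int) ^ N - 1 - ((N % 2 : Nat) : Int) = 3 * S := by
    linarith [hS, h2r]
  have hdiv : PySem.Int.floordiv (3 * S) 3 = S := by
    simp only [PySem.Int.floordiv]
    exact Int.mul_fdiv_cancel_left S (by norm_num)
  rw [hval, hdiv]
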